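-- pv_equiv track=rewrite | github.com/Alpha-Innovator/MME-Reasoning | vlmeval/dataset/mmereasoning/function4eval.py | calculate_answer_function_12
-- ===== SOURCE A (Python) =====
-- def calculate_answer_function_12(response_dict, answer_dict=None):
--     expect_keys = ['A', 'C', 'T', 'D', 'O', 'G', 'P', 'E', 'T', 'S']
--     for k in expect_keys:
--         if k not in response_dict.keys():
--             return False
--     num_1 = response_dict['C'] * 100 + response_dict['A'] * 10 + response_dict['T']
--     num_2 = response_dict['D'] * 100 + response_dict['O'] * 10 + response_dict['G']
--     num_3 = response_dict['P'] * 1000 + response_dict['E'] * 100 + response_dict['T'] * 10 + response_dict['S']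
--     return num_1 + num_2 == num_3
-- ===== SOURCE B (Python) =====
-- def calculate_answer_function_12(response_dict, answer_dict=None):
--     # Linear-combination formulation: CAT + DOG == PETS  iff  the signed,
--     # place-weighted coefficient of every letter times its digit sums to 0.
--     coeff = {}
--     for word, sign in (('CAT', 1), ('DOG', 1), ('PETS', -1)):
--         w = sign
--         for ch in reversed(word):
--             coeff[ch] = coeff.get(ch, 0) + w
--             w *= 10
--     if any(c not in response_dict for c in coeff):
--         return False
--     return sum(response_dict[c] * k for c, k in coeff.items()) == 0
-- ===== Notes on version B (the rewrite author's own statement) =====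
-- stated objective: alternative
-- what changed: Instead of A's hard-coded place-value numbers num_1+num_2==num_3, B builds a signed coefficient dictionary from the words ((CAT,+1),(DOG,+1),(PETS,-1)) by accumulating powers of ten, checks presence over that dict's keys, and tests whether the linear combination sum(value*coefficient) equals zero.
import Mathlib
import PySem

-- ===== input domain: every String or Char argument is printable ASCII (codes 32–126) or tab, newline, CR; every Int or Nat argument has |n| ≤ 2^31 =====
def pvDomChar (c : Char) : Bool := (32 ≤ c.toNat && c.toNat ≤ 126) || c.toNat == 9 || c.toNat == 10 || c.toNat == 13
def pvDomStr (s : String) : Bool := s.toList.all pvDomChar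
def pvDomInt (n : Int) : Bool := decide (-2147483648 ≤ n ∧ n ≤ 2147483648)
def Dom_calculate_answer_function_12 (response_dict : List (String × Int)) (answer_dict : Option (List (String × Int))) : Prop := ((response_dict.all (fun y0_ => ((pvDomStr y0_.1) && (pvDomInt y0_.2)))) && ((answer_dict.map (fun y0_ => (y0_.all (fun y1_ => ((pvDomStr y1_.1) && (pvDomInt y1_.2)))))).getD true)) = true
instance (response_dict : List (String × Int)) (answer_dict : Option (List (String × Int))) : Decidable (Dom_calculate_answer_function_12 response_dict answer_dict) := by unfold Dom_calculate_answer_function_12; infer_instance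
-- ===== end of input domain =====

-- B replaces A's three hard-coded place-value numbers with a signed coefficient map
-- built from the words (CAT,+1 / DOG,+1 / PETS,-1) and a single linear-combination-
-- equals-zero test over that map (objective: alternative algorithm, same cost).

-- ===== PORT A =====
-- the 'for k in expect_keys: if k not in response_dict.keys(): return False' loop
def pvCheckA (response_dict : List (String × Int)) : List String → Bool
  | [] =>
    -- after the loop every key is present, so Python's response_dict[k] cannot raise;
    -- getD 0 is exact here because the guard guarantees the key exists
    let num_1 := ((PySem.Dict.mk response_dict).get? "C").getD 0 * 100 + ((PySem.Dict.mk response_dict).get? "A").getD 0 * 10 + ((PySem.Dict.mk response_dict).get? "T").getD 0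
    let num_2 := ((PySem.Dict.mk response_dict).get? "D").getD 0 * 100 + ((PySem.Dict.mk response_dict).get? "O").getD 0 * 10 + ((PySem.Dict.mk response_dict).get? "G").getD 0
    let num_3 := ((PySem.Dict.mk response_dict).get? "P").getD 0 * 1000 + ((PySem.Dict.mk response_dict).get? "E").getD 0 * 100 + ((PySem.Dict.mk response_dict).get? "T").getD 0 * 10 + ((PySem.Dict.mk response_dict).get? "S").getD 0
    num_1 + num_2 == num_3
  | k :: ks =>
    if ¬ ((PySem.Dict.mk response_dict).get? k).isSome then false
    else pvCheckA response_dict ks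

def calculate_answer_function_12 (response_dict : List (String × Int)) (answer_dict : Option (List (String × Int))) : Bool :=
  pvCheckA response_dict ["A", "C", "T", "D", "O", "G", "P", "E", "T", "S"]

-- ===== PORT B =====
-- the coefficient dict: for each (word, sign), walk the word right-to-left with
-- running weight w (sign, sign*10, …) doing coeff[ch] = coeff.get(ch, 0) + w
def pvCoeff : PySem.Dict String Int :=
  ([("CAT", (1 : Int)), ("DOG", 1), ("PETS", -1)]).foldl
    (fun d ws =>
      (ws.1.toList.reverse.foldl
        (fun (p : PySem.Dict String Int × Int) ch =>
          (p.1.insert (String.ofList [ch]) (p.1.getD (String.ofList [ch]) 0 + p.2), p.2 * 10))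
        (d, ws.2)).1)
    PySem.Dict.empty

def calculate_answer_function_12_alt (response_dict : List (String × Int)) (answer_dict : Option (List (String × Int))) : Bool :=
  let coeff := pvCoeff
  if coeff.keys.any (fun c => !((PySem.Dict.mk response_dict).contains c)) then false
  else (coeff.items.foldl (fun s p => s + ((PySem.Dict.mk response_dict).get? p.1).getD 0 * p.2) 0) == 0

-- ===== PRECONDITION & SPEC =====
def Spec_calculate_answer_function_12 (response_dict : List (String × Int)) (answer_dict : Option (List (String × Int))) (out : Bool) : Prop := out = calculate_answer_function_12_alt response_dict answer_dict
instance (response_dict : List (String × Int)) (answer_dict : Option (List (String × Int))) (out : Bool) : Decidable (Spec_calculate_answer_function_12 response_dict answer_dict out) := by unfold Spec_calculate_answer_function_12; infer_instance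

-- ===== CLAIM (what is proved, stated in full; the proofs are below) =====
def Claim_equal_calculate_answer_function_12 : Prop := ∀ (response_dict : List (String × Int)) (answer_dict : Option (List (String × Int))), Dom_calculate_answer_function_12 response_dict answer_dict → Spec_calculate_answer_function_12 response_dict answer_dict (calculate_answer_function_12 response_dict answer_dict)

-- ===== LEMMAS AND PROOFS =====
lemma pvCheckA_all (rd : List (String × Int)) (ks : List String) :
    pvCheckA rd ks = if ks.all (fun k => ((PySem.Dict.mk rd).get? k).isSome) then pvCheckA rd [] else false := by
  induction ks with
  | nil => simp
  | cons k ks ih =>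
    simp only [pvCheckA, List.all_cons, ite_not]
    cases h : ((PySem.Dict.mk rd).get? k).isSome
    · simp
    · simpa using ih

-- the coefficient dict is a closed computation: its literal value
lemma pvCoeff_eq : pvCoeff = PySem.Dict.mk
    [("T", -9), ("A", 10), ("C", 100), ("G", 1), ("O", 10), ("D", 100),
     ("S", -1), ("E", -100), ("P", -1000)] := by decide

lemma pv_presence (bA bC bT bD bO bG bP bE bS : Bool) :
    (!bT || (!bA || (!bC || (!bG || (!bO || (!bD || (!bS || (!bE || !bP))))))))
      = !(bA && (bC && (bT && (bD && (bO && (bG && (bP && (bE && (bT && bS))))))))) := by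
  revert bA bC bT bD bO bG bP bE bS
  decide

-- ===== VERDICT (by name: the statement is the Claim_ definition above) =====
theorem calculate_answer_function_12_spec : Claim_equal_calculate_answer_function_12 := by
  intro rd ad _
  unfold Spec_calculate_answer_function_12
  rw [calculate_answer_function_12, pvCheckA_all]
  have hcont : ∀ k : String, (PySem.Dict.mk rd).contains k = ((PySem.Dict.mk rd).get? k).isSome := by
    intro k
    cases h : (PySem.Dict.mk rd).get? k with
    | none => simp [(PySem.Dict.get?_eq_none_iff_contains _ k).mp h]
    | some v =>
      cases hc : (PySem.Dict.mk rd).contains k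
      · have := (PySem.Dict.get?_eq_none_iff_contains _ k).mpr hc
        rw [h] at this; cases this
      · simp
  simp only [calculate_answer_function_12_alt, pvCoeff_eq, PySem.Dict.keys_mk, List.all_cons, List.all_nil, Bool.and_true, List.foldl]
  simp only [List.map_cons, List.map_nil, List.any_cons, List.any_nil, hcont, Bool.or_false]
  rw [pv_presence]
  split
  · rename_i h
    simp only [h, Bool.not_true, Bool.false_eq_true, if_false, pvCheckA]
    rw [Bool.eq_iff_iff]
    simp only [beq_iff_eq]
    omega
  · rename_i h
    rw [Bool.not_eq_true] at h
    simp [h]
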